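-- pv_equiv track=rewrite | github.com/christakakis/graph_network_analysis | communityDetectionTechniques/communityDetectionTechniques.py | fn
-- ===== SOURCE A (Python) =====
-- def sum_of_products(numbers): # i need this for the function that calculates the false negatives
--   """Returns the sum of each number multiplied with every other number"""
--   result = 0
--   for i in range(len(numbers)):
--       for j in range(i + 1, len(numbers)):
--           result += numbers[i] * numbers[j]
--   return result
--
-- def fn(groundTruthCommOfZeros,communities):
--   counter0=[]
--   counter1=[]
--   for community in communities:
--     count0=0
--     count1=0
--     for i in community:
--       if i in groundTruthCommOfZeros:
--          count0 +=1
--       else: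
--          count1 +=1
--     counter0.append(count0)
--     counter1.append(count1)
--   false_negatives = (sum_of_products(counter0)+sum_of_products(counter1))
--   return false_negatives
-- ===== SOURCE B (Python) =====
-- def fn(groundTruthCommOfZeros, communities):
--     gt = set(groundTruthCommOfZeros)
--     s0 = q0 = s1 = q1 = 0
--     for community in communities:
--         c0 = sum(1 for i in community if i in gt)
--         c1 = len(community) - c0
--         s0 += c0
--         q0 += c0 * c0
--         s1 += c1
--         q1 += c1 * c1
--     return (s0 * s0 - q0) // 2 + (s1 * s1 - q1) // 2
-- ===== Notes on version B (the rewrite author's own statement) =====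
-- stated objective: faster
-- what changed: Replaces the O(k^2) pairwise-product double loop with the closed form (sum^2 - sum of squares)//2 computed in a single pass over the communities, and replaces the linear membership scan of the ground-truth list with a set.
import Mathlib
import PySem

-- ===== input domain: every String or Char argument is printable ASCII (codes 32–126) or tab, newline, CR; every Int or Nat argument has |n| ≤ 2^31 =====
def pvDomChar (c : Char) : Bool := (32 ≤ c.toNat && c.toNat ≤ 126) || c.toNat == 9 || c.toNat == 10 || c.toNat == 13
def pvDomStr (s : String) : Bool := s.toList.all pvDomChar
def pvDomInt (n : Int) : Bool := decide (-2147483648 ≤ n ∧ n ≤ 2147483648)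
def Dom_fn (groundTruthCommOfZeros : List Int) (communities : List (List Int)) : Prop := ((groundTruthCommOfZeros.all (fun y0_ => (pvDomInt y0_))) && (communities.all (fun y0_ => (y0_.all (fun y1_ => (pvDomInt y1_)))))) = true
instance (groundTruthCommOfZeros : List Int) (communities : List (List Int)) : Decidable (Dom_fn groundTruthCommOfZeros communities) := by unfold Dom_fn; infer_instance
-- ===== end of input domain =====

-- B replaces A's O(k^2) pairwise-product double loop by the closed form (sum^2 - sum of squares)//2
-- accumulated in one pass, and the linear membership scan by a set (objective: faster).

-- ===== PORT A =====
-- sum_of_products: nested index loops; every index read is in range, so pyGetD's default 0 is never used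
def sumOfProducts (numbers : List Int) : Int :=
  (PySem.List.pyRange 0 (PySem.List.len numbers) 1).foldl (fun result i =>
    (PySem.List.pyRange (i + 1) (PySem.List.len numbers) 1).foldl (fun r j =>
      r + PySem.List.pyGetD numbers i 0 * PySem.List.pyGetD numbers j 0) result) 0

def fn (groundTruthCommOfZeros : List Int) (communities : List (List Int)) : Int :=
  let counters := communities.foldl
    (fun (acc : List Int × List Int) community =>
      let counts := community.foldl
        (fun (c : Int × Int) i =>
          if i ∈ groundTruthCommOfZeros then (c.1 + 1, c.2) else (c.1, c.2 + 1)) (0, 0)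
      (acc.1 ++ [counts.1], acc.2 ++ [counts.2])) ([], [])
  sumOfProducts counters.1 + sumOfProducts counters.2

-- ===== PORT B =====
def fn_alt (groundTruthCommOfZeros : List Int) (communities : List (List Int)) : Int :=
  let gt : PySem.Set Int := PySem.Set.ofList groundTruthCommOfZeros
  let st := communities.foldl
    (fun (st : Int × Int × Int × Int) community =>
      let c0 : Int := community.foldl (fun acc i => if PySem.Set.contains gt i then acc + 1 else acc) 0
      let c1 : Int := PySem.List.len community - c0
      (st.1 + c0, st.2.1 + c0 * c0, st.2.2.1 + c1, st.2.2.2 + c1 * c1)) (0, 0, 0, 0)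
  PySem.Int.floordiv (st.1 * st.1 - st.2.1) 2 + PySem.Int.floordiv (st.2.2.1 * st.2.2.1 - st.2.2.2) 2

-- ===== PRECONDITION & SPEC =====
def Spec_fn (groundTruthCommOfZeros : List Int) (communities : List (List Int)) (out : Int) : Prop := out = fn_alt groundTruthCommOfZeros communities
instance (groundTruthCommOfZeros : List Int) (communities : List (List Int)) (out : Int) : Decidable (Spec_fn groundTruthCommOfZeros communities out) := by unfold Spec_fn; infer_instance

-- ===== CLAIM (what is proved, stated in full; the proofs are below) =====
def Claim_equal_fn : Prop := ∀ (groundTruthCommOfZeros : List Int) (communities : List (List Int)), Dom_fn groundTruthCommOfZeros communities → Spec_fn groundTruthCommOfZeros communities (fn groundTruthCommOfZeros communities)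

-- ===== LEMMAS AND PROOFS =====

-- sum of the products of all unordered pairs, structurally
def pairSum : List Int → Int
  | [] => 0
  | x :: t => x * t.sum + pairSum t

theorem foldl_add_mul (l : List Int) (a : Int) (init : Int) :
    l.foldl (fun r v => r + a * v) init = init + a * l.sum := by
  induction l generalizing init with
  | nil => simp
  | cons x t ih => simp [List.foldl_cons, ih]; ring

theorem foldl_add_map {α : Type} (l : List α) (h : α → Int) (init : Int) :
    l.foldl (fun r x => r + h x) init = init + (l.map h).sum := by
  induction l generalizing init with
  | nil => simp
  | cons x t ih => simp [List.foldl_cons, ih]; ring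

theorem rangeSum_eq_pairSum (xs : List Int) :
    ((List.range xs.length).map (fun k => xs.getD k 0 * (xs.drop (k + 1)).sum)).sum
      = pairSum xs := by
  induction xs with
  | nil => simp [pairSum]
  | cons x t ih =>
    rw [List.length_cons, List.range_succ_eq_map, List.map_cons, List.map_map, List.sum_cons]
    simp only [Function.comp_def, Nat.succ_eq_add_one, List.getD_cons_succ, List.drop_succ_cons,
      List.getD_cons_zero, List.drop_zero, ih, pairSum]

theorem sumOfProducts_eq_pairSum (xs : List Int) : sumOfProducts xs = pairSum xs := by
  unfold sumOfProducts
  rw [PySem.List.foldl_congr_mem _ _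
      (fun result i => result + PySem.List.pyGetD xs i 0 * (xs.drop (i + 1).toNat).sum) 0 ?_]
  · rw [foldl_add_map, PySem.List.len_eq, PySem.List.pyRange_zero_natCast, List.map_map]
    have hk : ∀ k : Nat, ((k : Int) + 1).toNat = k + 1 := by intro k; omega
    simp only [Function.comp_def, zero_add, PySem.List.pyGetD_natCast, hk]
    exact rangeSum_eq_pairSum xs
  · intro acc i hi
    have h0i : 0 ≤ i := by
      rw [PySem.List.mem_pyRange_one] at hi
      exact hi.1
    rw [PySem.List.foldl_pyRange_pyGetD xs 0
      (f := fun r v => r + PySem.List.pyGetD xs i 0 * v) acc (by omega)]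
    exact foldl_add_mul _ _ _

theorem two_mul_pairSum (xs : List Int) :
    2 * pairSum xs = xs.sum * xs.sum - (xs.map (fun x => x * x)).sum := by
  induction xs with
  | nil => simp [pairSum]
  | cons x t ih => simp only [pairSum, List.map_cons, List.sum_cons]; nlinarith [ih]

theorem floordiv_two_mul (k : Int) : PySem.Int.floordiv (2 * k) 2 = k := by
  rw [PySem.Int.floordiv_eq_ediv_of_pos (by norm_num)]
  exact Int.mul_ediv_cancel_left k (by norm_num)

-- A's inner counting loop
theorem countA (g : List Int) (c : List Int) (a b : Int) :
    c.foldl (fun (s : Int × Int) i =>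
        if i ∈ g then (s.1 + 1, s.2) else (s.1, s.2 + 1)) (a, b)
      = (a + (c.countP (fun i => decide (i ∈ g)) : Int),
         b + (c.countP (fun i => !decide (i ∈ g)) : Int)) := by
  induction c generalizing a b with
  | nil => simp
  | cons x t ih =>
    by_cases hx : x ∈ g <;>
      simp [List.foldl_cons, hx, ih, List.countP_cons] <;> push_cast <;> ring

-- A's outer loop builds the two counter lists
theorem countersA (g : List Int) (cs : List (List Int)) (u v : List Int) :
    cs.foldl (fun (acc : List Int × List Int) community =>
        let counts := community.foldl
          (fun (c : Int × Int) i =>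
            if i ∈ g then (c.1 + 1, c.2) else (c.1, c.2 + 1)) (0, 0)
        (acc.1 ++ [counts.1], acc.2 ++ [counts.2])) (u, v)
      = (u ++ cs.map (fun c => (c.countP (fun i => decide (i ∈ g)) : Int)),
         v ++ cs.map (fun c => (c.countP (fun i => !decide (i ∈ g)) : Int))) := by
  induction cs generalizing u v with
  | nil => simp
  | cons c cs ih =>
    simp only [List.foldl_cons, countA g c 0 0, List.map_cons]
    rw [ih]
    simp

-- counting with a Bool predicate, generically
theorem countFold (q : Int → Bool) (c : List Int) (init : Int) :
    c.foldl (fun acc i => if q i then acc + 1 else acc) init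
      = init + (c.countP q : Int) := by
  induction c generalizing init with
  | nil => simp
  | cons x t ih =>
    cases h : q x <;> simp [List.foldl_cons, h, ih, List.countP_cons] <;> push_cast <;> ring

-- B's counting loop
theorem countB (g : List Int) (c : List Int) (init : Int) :
    c.foldl (fun acc i =>
        if PySem.Set.contains (PySem.Set.ofList g) i then acc + 1 else acc) init
      = init + (c.countP (fun i => decide (i ∈ g)) : Int) := by
  rw [countFold]
  congr 2
  apply List.countP_congr
  intro x _
  rw [PySem.Set.contains_iff, PySem.Set.mem_ofList, decide_eq_true_iff]

-- the complement count equals length minus the count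
theorem c1_eq (g : List Int) (c : List Int) :
    (PySem.List.len c : Int) - (c.countP (fun i => decide (i ∈ g)) : Int)
      = (c.countP (fun i => !decide (i ∈ g)) : Int) := by
  rw [PySem.List.len_eq]
  have := List.length_eq_countP_add_countP (fun i => decide (i ∈ g)) (l := c)
  have h2 : c.countP (fun i => decide ¬(decide (i ∈ g)) = true)
      = c.countP (fun i => !decide (i ∈ g)) := by
    apply List.countP_congr; intro x _; by_cases hx : x ∈ g <;> simp [hx]
  omega

-- B's accumulation loop computes the four sums
theorem stateB (g : List Int) (cs : List (List Int)) (s0 q0 s1 q1 : Int) :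
    cs.foldl (fun (st : Int × Int × Int × Int) community =>
        let c0 : Int := community.foldl
          (fun acc i => if PySem.Set.contains (PySem.Set.ofList g) i then acc + 1 else acc) 0
        let c1 : Int := PySem.List.len community - c0
        (st.1 + c0, st.2.1 + c0 * c0, st.2.2.1 + c1, st.2.2.2 + c1 * c1)) (s0, q0, s1, q1)
      = (s0 + (cs.map (fun c => (c.countP (fun i => decide (i ∈ g)) : Int))).sum,
         q0 + (cs.map (fun c => (c.countP (fun i => decide (i ∈ g)) : Int)
                * (c.countP (fun i => decide (i ∈ g)) : Int))).sum,
         s1 + (cs.map (fun c => (c.countP (fun i => !decide (i ∈ g)) : Int))).sum,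
         q1 + (cs.map (fun c => (c.countP (fun i => !decide (i ∈ g)) : Int)
                * (c.countP (fun i => !decide (i ∈ g)) : Int))).sum) := by
  induction cs generalizing s0 q0 s1 q1 with
  | nil => simp
  | cons c cs ih =>
    simp only [List.foldl_cons, countB g c 0, zero_add, c1_eq g c, List.map_cons, List.sum_cons]
    rw [ih]
    refine Prod.ext (by ring) (Prod.ext (by ring) (Prod.ext (by ring) (by ring)))

theorem pairSum_floordiv (l : List Int) :
    pairSum l = PySem.Int.floordiv (l.sum * l.sum - (l.map (fun x => x * x)).sum) 2 := by
  rw [← two_mul_pairSum, floordiv_two_mul]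

-- ===== VERDICT (by name: the statement is the Claim_ definition above) =====
theorem fn_spec : Claim_equal_fn := by
  intro g cs _
  unfold Spec_fn fn fn_alt
  simp only
  rw [countersA g cs [] [], stateB g cs 0 0 0 0]
  simp only [List.nil_append, zero_add]
  rw [sumOfProducts_eq_pairSum, sumOfProducts_eq_pairSum,
    pairSum_floordiv, pairSum_floordiv, List.map_map, List.map_map]
  rfl
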